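-- pv_equiv track=rewrite | github.com/schilkp/PmodADC | Scripts/Utils/parse_recording.py | find_samples
-- ===== SOURCE A (Python) =====
-- def find_samples(data):
--     """
--     Parse a list of raw packages into a list of raw samples
--     :param data: List of raw packages (int)
--     :return: samples, fail_count.
--              samples: List of raw samples
--              fail_count: number of samples that could not be decoded
--     """
--
--     sample = None
--     looking_for_pckg = 1
--     samples = []
--     fail_count = 0
--
--     for i in range(len(data)):
--         if looking_for_pckg == 1:
--             # Check if this is a starting byte
--             if (data[i] & 0x80) != 0:
--                 sample = (data[i] & 0x7F) << 7
--                 looking_for_pckg = 2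
--             else:
--                 fail_count = fail_count + 1
--                 continue
--         else:
--             # Check this is not a starting byte
--             if (data[i] & 0x80) == 0:
--                 sample = (data[i] & 0x7F) | sample
--                 samples.append(sample)
--                 sample = None
--                 looking_for_pckg = 1
--             else:
--                 sample = None
--                 looking_for_pckg = 1
--                 fail_count = fail_count + 1
--                 continue
--
--     return samples, fail_count
-- ===== SOURCE B (Python) =====
-- def find_samples(data):
--     """
--     Parse a list of raw packages into a list of raw samples
--     :param data: List of raw packages (int)
--     :return: samples, fail_count.
--     """
--     samples = []
--     fail_count = 0
--     i = 0
--     n = len(data)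
--     while i < n:
--         if (data[i] & 0x80) != 0:
--             if i + 1 < n:
--                 if (data[i + 1] & 0x80) == 0:
--                     samples.append((data[i + 1] & 0x7F) | ((data[i] & 0x7F) << 7))
--                 else:
--                     fail_count += 1
--                 i += 2
--             else:
--                 # trailing start byte: consumed while waiting for a continuation
--                 i += 1
--         else:
--             # continuation byte with no preceding start byte
--             fail_count += 1
--             i += 1
--     return samples, fail_count
-- ===== Notes on version B (the rewrite author's own statement) =====
-- stated objective: simpler
-- what changed: Replaces the looking_for_pckg state-flag loop with a while loop that consumes a start byte together with a one-byte lookahead, eliminating the cross-iteration state variables sample and looking_for_pckg.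
import Mathlib
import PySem

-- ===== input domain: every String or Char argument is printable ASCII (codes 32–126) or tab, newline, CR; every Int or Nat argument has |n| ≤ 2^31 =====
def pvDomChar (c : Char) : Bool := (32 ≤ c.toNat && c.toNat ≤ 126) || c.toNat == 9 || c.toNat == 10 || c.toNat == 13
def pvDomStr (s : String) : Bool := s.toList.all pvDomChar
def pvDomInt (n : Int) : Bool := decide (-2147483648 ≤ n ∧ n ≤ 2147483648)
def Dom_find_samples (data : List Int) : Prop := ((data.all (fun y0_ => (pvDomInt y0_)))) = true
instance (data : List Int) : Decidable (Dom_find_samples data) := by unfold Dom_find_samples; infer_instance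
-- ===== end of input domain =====

-- B replaces A's looking_for_pckg state-flag loop with a lookahead pair-consuming loop; objective: simpler.


-- ===== PORT A =====
-- A's for-loop over data with state (sample, looking_for_pckg, samples, fail_count), step for step.
def findSamplesLoopA : List Int → Option Int → Int → List Int → Int → List Int × Int
  | [], _, _, samples, fail_count => (samples, fail_count)
  | d :: rest, sample, looking_for_pckg, samples, fail_count =>
    if looking_for_pckg == 1 then
      if PySem.Int.band d 0x80 ≠ 0 then
        findSamplesLoopA rest (some ((PySem.Int.band d 0x7F) <<< (7 : Nat))) 2 samples fail_count
      else
        findSamplesLoopA rest sample looking_for_pckg samples (fail_count + 1)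
    else
      if PySem.Int.band d 0x80 == 0 then
        findSamplesLoopA rest none 1
          (samples ++ [PySem.Int.bor (PySem.Int.band d 0x7F) (sample.getD 0)]) fail_count
      else
        findSamplesLoopA rest none 1 samples (fail_count + 1)

def find_samples (data : List Int) : List Int × Int :=
  findSamplesLoopA data none 1 [] 0

-- ===== PORT B =====
-- B's while loop over index i, written as recursion on the not-yet-consumed suffix of data
-- (advancing i by 1 or 2 = dropping one or two bytes).
def findSamplesLoopB : List Int → List Int → Int → List Int × Int
  | [], samples, fail_count => (samples, fail_count)
  | d :: rest, samples, fail_count =>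
    if PySem.Int.band d 0x80 ≠ 0 then
      match rest with
      | d1 :: rest2 =>
        if PySem.Int.band d1 0x80 == 0 then
          findSamplesLoopB rest2
            (samples ++ [PySem.Int.bor (PySem.Int.band d1 0x7F) ((PySem.Int.band d 0x7F) <<< (7 : Nat))])
            fail_count
        else
          findSamplesLoopB rest2 samples (fail_count + 1)
      | [] => (samples, fail_count)  -- trailing start byte: nothing decoded, no failure
    else
      findSamplesLoopB rest samples (fail_count + 1)

def find_samples_alt (data : List Int) : List Int × Int :=
  findSamplesLoopB data [] 0

-- ===== PRECONDITION & SPEC =====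
def Spec_find_samples (data : List Int) (out : List Int × Int) : Prop := out = find_samples_alt data
instance (data : List Int) (out : List Int × Int) : Decidable (Spec_find_samples data out) := by unfold Spec_find_samples; infer_instance

-- ===== CLAIM (what is proved, stated in full; the proofs are below) =====
def Claim_equal_find_samples : Prop := ∀ (data : List Int), Dom_find_samples data → Spec_find_samples data (find_samples data)

-- ===== LEMMAS AND PROOFS =====

-- Invariant: from the "looking for a start byte" state A agrees with B, and from the
-- "have a start byte, sample = some v" state A agrees with B's lookahead continuation.
theorem findSamplesLoop_agree (l : List Int) :
    (∀ samples fail_count, findSamplesLoopA l none 1 samples fail_count = findSamplesLoopB l samples fail_count) ∧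
    (∀ v samples fail_count, findSamplesLoopA l (some v) 2 samples fail_count =
      match l with
      | [] => (samples, fail_count)
      | d1 :: rest2 =>
        if PySem.Int.band d1 0x80 == 0 then
          findSamplesLoopB rest2 (samples ++ [PySem.Int.bor (PySem.Int.band d1 0x7F) v]) fail_count
        else
          findSamplesLoopB rest2 samples (fail_count + 1)) := by
  induction l with
  | nil => exact ⟨fun _ _ => rfl, fun _ _ _ => rfl⟩
  | cons d rest ih =>
    refine ⟨fun samples fail_count => ?_, fun v samples fail_count => ?_⟩
    · conv_rhs => rw [findSamplesLoopB.eq_def]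
      by_cases h : PySem.Int.band d 0x80 = 0
      · simp [findSamplesLoopA, h, ih.1]
      · simp only [findSamplesLoopA]
        simp [h, ih.2]
        cases rest <;> rfl
    · by_cases h : PySem.Int.band d 0x80 = 0
      · simp [findSamplesLoopA, h, ih.1]
      · simp [findSamplesLoopA, h, ih.1]

-- ===== VERDICT (by name: the statement is the Claim_ definition above) =====
theorem find_samples_spec : Claim_equal_find_samples := by
  intro data _
  unfold Spec_find_samples find_samples find_samples_alt
  exact (findSamplesLoop_agree data).1 [] 0
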